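-- pv_equiv track=rewrite | github.com/nikhilpolpakkara/Python | Exercise files/Basic Data processsing and Visualisation/Final Project/New NBA stat.py | new_ranking_dict
-- ===== SOURCE A (Python) =====
-- def new_ranking_dict(v1,v2,v3,v4,v5):
--     new_dict = {}
--     for i,j in v1.items():
--         for x,y in v2.items():
--             for a,b in v3.items():
--                 for g,f in v4.items():
--                     for k,l in v5.items():
--                         if i==x==a==g==k:
--                             new_dict[i]=j+y+b+f+l
--     new_rank = [(new_dict[p],p) for p in new_dict]
--     new_rank.sort()
--     return new_rank
-- ===== SOURCE B (Python) =====
-- def new_ranking_dict(v1, v2, v3, v4, v5):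
--     new_rank = []
--     for name, s in v1.items():
--         if name in v2 and name in v3 and name in v4 and name in v5:
--             new_rank.append((s + v2[name] + v3[name] + v4[name] + v5[name], name))
--     new_rank.sort()
--     return new_rank
-- ===== Notes on version B (the rewrite author's own statement) =====
-- stated objective: faster
-- what changed: Replaces the five nested loops over all key combinations (quintic product scan) by a single pass over v1 with direct hash lookups in v2..v5; Pre_ restricts the association-list arguments to distinct keys, since the Python arguments are dicts and cannot carry duplicate keys.
import Mathlib
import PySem

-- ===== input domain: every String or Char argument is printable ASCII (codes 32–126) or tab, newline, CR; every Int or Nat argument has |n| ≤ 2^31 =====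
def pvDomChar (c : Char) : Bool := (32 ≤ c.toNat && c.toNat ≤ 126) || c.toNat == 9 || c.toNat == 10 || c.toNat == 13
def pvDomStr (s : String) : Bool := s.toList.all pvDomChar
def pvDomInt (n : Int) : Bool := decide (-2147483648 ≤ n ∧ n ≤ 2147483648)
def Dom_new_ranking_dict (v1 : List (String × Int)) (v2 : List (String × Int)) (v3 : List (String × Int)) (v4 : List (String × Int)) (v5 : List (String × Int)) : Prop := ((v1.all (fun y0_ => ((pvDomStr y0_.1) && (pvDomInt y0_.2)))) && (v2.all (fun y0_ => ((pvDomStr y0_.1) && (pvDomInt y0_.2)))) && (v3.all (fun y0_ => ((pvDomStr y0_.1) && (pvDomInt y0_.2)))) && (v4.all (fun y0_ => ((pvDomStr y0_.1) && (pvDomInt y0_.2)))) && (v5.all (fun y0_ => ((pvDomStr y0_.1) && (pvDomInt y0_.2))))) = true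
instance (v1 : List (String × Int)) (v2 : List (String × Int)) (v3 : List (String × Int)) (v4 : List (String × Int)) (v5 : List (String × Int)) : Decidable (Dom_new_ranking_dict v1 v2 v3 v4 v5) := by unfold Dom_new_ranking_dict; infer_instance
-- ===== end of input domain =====

-- B replaces A's five nested loops over every key combination by one pass over v1 with
-- direct lookups in v2..v5 (asymptotically faster); equivalence is proved for association
-- lists with pairwise-distinct keys, i.e. exactly those that represent Python dicts.

-- ===== PORT A =====
def new_ranking_dict (v1 : List (String × Int)) (v2 : List (String × Int)) (v3 : List (String × Int)) (v4 : List (String × Int)) (v5 : List (String × Int)) : List (Int × String) :=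
  let new_dict : PySem.Dict String Int :=
    v1.foldl (fun d ij =>
      v2.foldl (fun d xy =>
        v3.foldl (fun d ab =>
          v4.foldl (fun d gf =>
            v5.foldl (fun d kl =>
              if ij.1 == xy.1 && (xy.1 == ab.1 && (ab.1 == gf.1 && (gf.1 == kl.1))) then
                d.insert ij.1 (ij.2 + xy.2 + ab.2 + gf.2 + kl.2)
              else d) d) d) d) d) PySem.Dict.empty
  -- [(new_dict[p], p) for p in new_dict]: the lookup cannot miss (p ranges over the keys), so getD's default is never used
  let new_rank := new_dict.keys.map (fun p => (new_dict.getD p 0, p))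
  PySem.List.sorted2 new_rank (fun t => t.1) (fun t => t.2) false

-- ===== PORT B =====
def new_ranking_dict_alt (v1 : List (String × Int)) (v2 : List (String × Int)) (v3 : List (String × Int)) (v4 : List (String × Int)) (v5 : List (String × Int)) : List (Int × String) :=
  let d2 := PySem.Dict.mk v2
  let d3 := PySem.Dict.mk v3
  let d4 := PySem.Dict.mk v4
  let d5 := PySem.Dict.mk v5
  -- 'v2[name]' etc. are guarded by the membership tests, so getD's default is never used
  let new_rank := v1.foldl (fun acc p =>
    if d2.contains p.1 && d3.contains p.1 && d4.contains p.1 && d5.contains p.1 then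
      acc ++ [(p.2 + d2.getD p.1 0 + d3.getD p.1 0 + d4.getD p.1 0 + d5.getD p.1 0, p.1)]
    else acc) []
  PySem.List.sorted2 new_rank (fun t => t.1) (fun t => t.2) false

-- ===== PRECONDITION & SPEC =====
-- Pre_ requires pairwise-distinct keys in each of the five association lists: A's Python
-- parameters are dicts, which cannot contain a duplicate key, so lists with duplicate keys
-- represent no Python input at all.
def Pre_new_ranking_dict (v1 : List (String × Int)) (v2 : List (String × Int)) (v3 : List (String × Int)) (v4 : List (String × Int)) (v5 : List (String × Int)) : Prop :=
  (v1.map Prod.fst).Nodup ∧ (v2.map Prod.fst).Nodup ∧ (v3.map Prod.fst).Nodup ∧ (v4.map Prod.fst).Nodup ∧ (v5.map Prod.fst).Nodup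
instance (v1 : List (String × Int)) (v2 : List (String × Int)) (v3 : List (String × Int)) (v4 : List (String × Int)) (v5 : List (String × Int)) : Decidable (Pre_new_ranking_dict v1 v2 v3 v4 v5) := by unfold Pre_new_ranking_dict; infer_instance

def pvWitness_new_ranking_dict : (List (String × Int)) × (List (String × Int)) × (List (String × Int)) × (List (String × Int)) × (List (String × Int)) :=
  ([("lbj", 10), ("kd", 7)], [("kd", 3)], [("kd", 2), ("pg", 5)], [("kd", 1)], [("kd", 4), ("lbj", 9)])

def Spec_new_ranking_dict (v1 : List (String × Int)) (v2 : List (String × Int)) (v3 : List (String × Int)) (v4 : List (String × Int)) (v5 : List (String × Int)) (out : List (Int × String)) : Prop := out = new_ranking_dict_alt v1 v2 v3 v4 v5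
instance (v1 : List (String × Int)) (v2 : List (String × Int)) (v3 : List (String × Int)) (v4 : List (String × Int)) (v5 : List (String × Int)) (out : List (Int × String)) : Decidable (Spec_new_ranking_dict v1 v2 v3 v4 v5 out) := by unfold Spec_new_ranking_dict; infer_instance

-- ===== CLAIM (what is proved, stated in full; the proofs are below) =====
def Claim_equal_new_ranking_dict : Prop := ∀ (v1 : List (String × Int)) (v2 : List (String × Int)) (v3 : List (String × Int)) (v4 : List (String × Int)) (v5 : List (String × Int)), Dom_new_ranking_dict v1 v2 v3 v4 v5 → Pre_new_ranking_dict v1 v2 v3 v4 v5 → Spec_new_ranking_dict v1 v2 v3 v4 v5 (new_ranking_dict v1 v2 v3 v4 v5)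

-- ===== LEMMAS AND PROOFS =====

theorem pv_foldl_skip {α β : Type} (v : List β) (d : α) : v.foldl (fun d _ => d) d = d := by
  induction v <;> simp_all [List.foldl]

theorem pv_layer_none {α : Type} (v : List (String × Int)) (key : String)
    (F : α → String → Int → α) (d : α)
    (h : ∀ p ∈ v, (key == p.1) = false) :
    v.foldl (fun d p => if key == p.1 then F d p.1 p.2 else d) d = d := by
  induction v generalizing d with
  | nil => rfl
  | cons p rest ih =>
    have hp := h p (by simp)
    rw [List.foldl_cons, if_neg (by simp [hp])]
    exact ih d (fun q hq => h q (by simp [hq]))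

theorem pv_layer0 {α : Type} (v : List (String × Int)) (key : String)
    (F : α → String → Int → α) (d : α)
    (hnd : (v.map Prod.fst).Nodup) :
    v.foldl (fun d p => if key == p.1 then F d p.1 p.2 else d) d
      = (match (PySem.Dict.mk v).get? key with
         | some l => F d key l
         | none => d) := by
  induction v with
  | nil => simp [PySem.Dict.get?]
  | cons p rest ih =>
    obtain ⟨k, w⟩ := p
    rw [List.foldl_cons, PySem.Dict.get?_mk_cons]
    by_cases hp : key = k
    · subst hp
      rw [if_pos (by simp)]
      simp only [beq_self_eq_true, if_pos]
      have hnotin : ∀ q ∈ rest, (key == q.1) = false := by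
        intro q hq
        have hnd' : (key :: rest.map Prod.fst).Nodup := by simpa using hnd
        have : key ∉ rest.map Prod.fst := (List.nodup_cons.mp hnd').1
        simp only [beq_eq_false_iff_ne, ne_eq]
        intro h; exact this (h ▸ List.mem_map_of_mem hq)
      exact pv_layer_none rest key F (F d key w) hnotin
    · rw [if_neg (by simpa using fun h => hp (by simpa using h))]
      rw [if_neg (by simpa using fun h => hp ((by simpa using h : k = key)).symm)]
      have hnd' : (k :: rest.map Prod.fst).Nodup := by simpa using hnd
      exact ih (List.nodup_cons.mp hnd').2

theorem pv_layer {α : Type} (v : List (String × Int)) (key : String) (c : Bool)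
    (F : α → String → Int → α) (d : α)
    (hnd : (v.map Prod.fst).Nodup) :
    v.foldl (fun d p => if c && (key == p.1) then F d p.1 p.2 else d) d
      = if c then (match (PySem.Dict.mk v).get? key with
                   | some l => F d key l
                   | none => d) else d := by
  cases c with
  | false =>
    simp only [Bool.false_and, if_neg (by simp : ¬ (false = true))]
    exact pv_foldl_skip v d
  | true =>
    simp only [Bool.true_and]
    exact pv_layer0 v key F d hnd

def pvC (v2 v3 v4 v5 : List (String × Int)) (p : String × Int) : Bool :=
  (PySem.Dict.mk v2).contains p.1 && (PySem.Dict.mk v3).contains p.1 &&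
  (PySem.Dict.mk v4).contains p.1 && (PySem.Dict.mk v5).contains p.1

def pvS (v2 v3 v4 v5 : List (String × Int)) (p : String × Int) : Int :=
  p.2 + (PySem.Dict.mk v2).getD p.1 0 + (PySem.Dict.mk v3).getD p.1 0 +
  (PySem.Dict.mk v4).getD p.1 0 + (PySem.Dict.mk v5).getD p.1 0

-- the four nested inner loops of A, for one fixed entry ij of v1, are one guarded insert
theorem pv_phi_eq (v2 v3 v4 v5 : List (String × Int))
    (h2 : (v2.map Prod.fst).Nodup) (h3 : (v3.map Prod.fst).Nodup)
    (h4 : (v4.map Prod.fst).Nodup) (h5 : (v5.map Prod.fst).Nodup)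
    (ij : String × Int) (d : PySem.Dict String Int) :
    (v2.foldl (fun d xy =>
      v3.foldl (fun d ab =>
        v4.foldl (fun d gf =>
          v5.foldl (fun d kl =>
            if ij.1 == xy.1 && (xy.1 == ab.1 && (ab.1 == gf.1 && (gf.1 == kl.1))) then
              d.insert ij.1 (ij.2 + xy.2 + ab.2 + gf.2 + kl.2)
            else d) d) d) d) d)
    = if pvC v2 v3 v4 v5 ij then d.insert ij.1 (pvS v2 v3 v4 v5 ij) else d := by
  have step5 : ∀ (xy ab gf : String × Int) (d : PySem.Dict String Int),
      v5.foldl (fun d kl =>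
        if ij.1 == xy.1 && (xy.1 == ab.1 && (ab.1 == gf.1 && (gf.1 == kl.1))) then
          d.insert ij.1 (ij.2 + xy.2 + ab.2 + gf.2 + kl.2) else d) d
      = if (ij.1 == xy.1 && xy.1 == ab.1) && (ab.1 == gf.1) then
          (match (PySem.Dict.mk v5).get? gf.1 with
           | some l => d.insert ij.1 (ij.2 + xy.2 + ab.2 + gf.2 + l)
           | none => d) else d := by
    intro xy ab gf d
    have h := pv_layer v5 gf.1 ((ij.1 == xy.1 && xy.1 == ab.1) && (ab.1 == gf.1))
      (fun d _ l => d.insert ij.1 (ij.2 + xy.2 + ab.2 + gf.2 + l)) d h5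
    simpa [Bool.and_assoc] using h
  have step4 : ∀ (xy ab : String × Int) (d : PySem.Dict String Int),
      v4.foldl (fun d gf =>
        v5.foldl (fun d kl =>
          if ij.1 == xy.1 && (xy.1 == ab.1 && (ab.1 == gf.1 && (gf.1 == kl.1))) then
            d.insert ij.1 (ij.2 + xy.2 + ab.2 + gf.2 + kl.2) else d) d) d
      = if ij.1 == xy.1 && xy.1 == ab.1 then
          (match (PySem.Dict.mk v4).get? ab.1 with
           | some f =>
             (match (PySem.Dict.mk v5).get? ab.1 with
              | some l => d.insert ij.1 (ij.2 + xy.2 + ab.2 + f + l)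
              | none => d)
           | none => d) else d := by
    intro xy ab d
    rw [PySem.List.foldl_congr_mem v4 _ _ d (fun d gf _ => step5 xy ab gf d)]
    have h := pv_layer v4 ab.1 (ij.1 == xy.1 && xy.1 == ab.1)
      (fun d g f => match (PySem.Dict.mk v5).get? g with
                    | some l => d.insert ij.1 (ij.2 + xy.2 + ab.2 + f + l)
                    | none => d) d h4
    simpa [Bool.and_assoc] using h
  have step3 : ∀ (xy : String × Int) (d : PySem.Dict String Int),
      v3.foldl (fun d ab =>
        v4.foldl (fun d gf =>
          v5.foldl (fun d kl =>
            if ij.1 == xy.1 && (xy.1 == ab.1 && (ab.1 == gf.1 && (gf.1 == kl.1))) then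
              d.insert ij.1 (ij.2 + xy.2 + ab.2 + gf.2 + kl.2) else d) d) d) d
      = if ij.1 == xy.1 then
          (match (PySem.Dict.mk v3).get? xy.1 with
           | some b =>
             (match (PySem.Dict.mk v4).get? xy.1 with
              | some f =>
                (match (PySem.Dict.mk v5).get? xy.1 with
                 | some l => d.insert ij.1 (ij.2 + xy.2 + b + f + l)
                 | none => d)
              | none => d)
           | none => d) else d := by
    intro xy d
    rw [PySem.List.foldl_congr_mem v3 _ _ d (fun d ab _ => step4 xy ab d)]
    have h := pv_layer v3 xy.1 (ij.1 == xy.1)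
      (fun d a b => match (PySem.Dict.mk v4).get? a with
                    | some f =>
                      (match (PySem.Dict.mk v5).get? a with
                       | some l => d.insert ij.1 (ij.2 + xy.2 + b + f + l)
                       | none => d)
                    | none => d) d h3
    simpa [Bool.and_assoc] using h
  rw [PySem.List.foldl_congr_mem v2 _ _ d (fun d xy _ => step3 xy d)]
  have h := pv_layer0 v2 ij.1
    (fun d x y => match (PySem.Dict.mk v3).get? x with
                  | some b =>
                    (match (PySem.Dict.mk v4).get? x with
                     | some f =>
                       (match (PySem.Dict.mk v5).get? x with
                        | some l => d.insert ij.1 (ij.2 + y + b + f + l)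
                        | none => d)
                     | none => d)
                  | none => d) d h2
  rw [h]
  simp only [pvC, pvS, PySem.Dict.contains_eq_isSome_get?, PySem.Dict.getD_eq_get?_getD]
  rcases (PySem.Dict.mk v2).get? ij.1 with _ | y <;>
    rcases (PySem.Dict.mk v3).get? ij.1 with _ | b <;>
      rcases (PySem.Dict.mk v4).get? ij.1 with _ | f <;>
        rcases (PySem.Dict.mk v5).get? ij.1 with _ | l <;> simp

-- ===== VERDICT (by name: the statement is the Claim_ definition above) =====
theorem new_ranking_dict_spec : Claim_equal_new_ranking_dict := by
  intro v1 v2 v3 v4 v5 _ hpre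
  obtain ⟨h1, h2, h3, h4, h5⟩ := hpre
  unfold Spec_new_ranking_dict new_ranking_dict new_ranking_dict_alt
  have hB : v1.foldl (fun acc p =>
      if (PySem.Dict.mk v2).contains p.1 && (PySem.Dict.mk v3).contains p.1 &&
         (PySem.Dict.mk v4).contains p.1 && (PySem.Dict.mk v5).contains p.1 then
        acc ++ [(p.2 + (PySem.Dict.mk v2).getD p.1 0 + (PySem.Dict.mk v3).getD p.1 0 +
                 (PySem.Dict.mk v4).getD p.1 0 + (PySem.Dict.mk v5).getD p.1 0, p.1)]
      else acc) ([] : List (Int × String))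
      = (v1.filter (pvC v2 v3 v4 v5)).map (fun p => (pvS v2 v3 v4 v5 p, p.1)) := by
    have h := PySem.List.foldl_append_if (pvC v2 v3 v4 v5)
      (fun p => (pvS v2 v3 v4 v5 p, p.1)) v1 ([] : List (Int × String))
    simpa [pvC, pvS] using h
  have hD : (v1.foldl (fun d ij =>
      v2.foldl (fun d xy =>
        v3.foldl (fun d ab =>
          v4.foldl (fun d gf =>
            v5.foldl (fun d kl =>
              if ij.1 == xy.1 && (xy.1 == ab.1 && (ab.1 == gf.1 && (gf.1 == kl.1))) then
                d.insert ij.1 (ij.2 + xy.2 + ab.2 + gf.2 + kl.2)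
              else d) d) d) d) d) PySem.Dict.empty)
      = (v1.filter (pvC v2 v3 v4 v5)).foldl
          (fun d p => d.insert p.1 (pvS v2 v3 v4 v5 p)) PySem.Dict.empty := by
    rw [PySem.List.foldl_congr_mem v1 _ _ PySem.Dict.empty
      (fun d ij _ => pv_phi_eq v2 v3 v4 v5 h2 h3 h4 h5 ij d)]
    rw [List.foldl_filter]
  set D := (v1.filter (pvC v2 v3 v4 v5)).foldl
      (fun d p => d.insert p.1 (pvS v2 v3 v4 v5 p)) PySem.Dict.empty with hDdef
  have hknd : ((v1.filter (pvC v2 v3 v4 v5)).map Prod.fst).Nodup :=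
    ((List.filter_sublist).map Prod.fst).nodup h1
  have hitems : D.items = (v1.filter (pvC v2 v3 v4 v5)).map (fun p => (p.1, pvS v2 v3 v4 v5 p)) := by
    rw [hDdef]
    have h := PySem.Dict.items_foldl_insert_fresh (v1.filter (pvC v2 v3 v4 v5))
      Prod.fst (pvS v2 v3 v4 v5) PySem.Dict.empty
      (fun a _ => PySem.Dict.contains_empty a.1) hknd
    simpa using h
  have hkeys : D.keys = (v1.filter (pvC v2 v3 v4 v5)).map Prod.fst := by
    simp only [PySem.Dict.keys, hitems, List.map_map]
    rfl
  have hkeysnd : D.keys.Nodup := by rw [hkeys]; exact hknd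
  have hX : D.keys.map (fun p => (D.getD p 0, p))
      = (v1.filter (pvC v2 v3 v4 v5)).map (fun p => (pvS v2 v3 v4 v5 p, p.1)) := by
    rw [hkeys, List.map_map]
    refine List.map_congr_left (fun p hp => ?_)
    have hmem : (p.1, pvS v2 v3 v4 v5 p) ∈ D.items := by
      rw [hitems]; exact List.mem_map_of_mem hp
    simp [Function.comp, PySem.Dict.getD_of_mem_items D hmem hkeysnd 0]
  simp only [hB, hD, hX]
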